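-- pv_equiv track=rewrite | github.com/besforyou999/Programmers | 2019_KAKAO_WINTER_INTERNSHIP/toy_crane_game/main.py | solution
-- ===== SOURCE A (Python) =====
-- def solution(board, moves):
--     answer = 0
--     width = len(board)
--     basket = []
--     stack_arr = [[] for _ in range(width)]
--     idx = width - 1
--     while idx >= 0:
--         for i in range(width):
--             val = board[idx][i]
--             if val != 0:
--                 stack_arr[i].append(val)
--         idx -= 1
--
--     for move in moves:
--         stack = stack_arr[move - 1]
--         if len(stack) == 0:
--             continue
--         val = stack.pop()
--         if len(basket) == 0:
--             basket.append(val)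
--             continue
--         top_number = basket[-1]
--         if val == top_number:
--             basket.pop()
--             answer += 2
--         else:
--             basket.append(val)
--
--     return answer
-- ===== SOURCE B (Python) =====
-- def solution(board, moves):
--     # Direct simulation on a copied grid: no upfront column-stack build;
--     # each move scans its column top-down for the first doll.
--     grid = [row[:] for row in board]
--     answer = 0
--     basket = []
--     for move in moves:
--         c = move - 1
--         for r in range(len(board)):
--             v = grid[r][c]
--             if v != 0:
--                 grid[r][c] = 0
--                 if basket and basket[-1] == v:
--                     basket.pop()
--                     answer += 2
--                 else:
--                     basket.append(v)
--                 break
--     return answer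
-- ===== Notes on version B (the rewrite author's own statement) =====
-- stated objective: simpler
-- what changed: Dropped A's upfront per-column stack precomputation; B copies the board and, for each move, scans that column top-down for the first doll, zeroes it in place and feeds it to the same basket pairing logic.
-- outside the precondition, e.g. on solution([[1, 2, 9], [1, 2, 9]], [2, 0]): A returns 2, B returns 0
import Mathlib
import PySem

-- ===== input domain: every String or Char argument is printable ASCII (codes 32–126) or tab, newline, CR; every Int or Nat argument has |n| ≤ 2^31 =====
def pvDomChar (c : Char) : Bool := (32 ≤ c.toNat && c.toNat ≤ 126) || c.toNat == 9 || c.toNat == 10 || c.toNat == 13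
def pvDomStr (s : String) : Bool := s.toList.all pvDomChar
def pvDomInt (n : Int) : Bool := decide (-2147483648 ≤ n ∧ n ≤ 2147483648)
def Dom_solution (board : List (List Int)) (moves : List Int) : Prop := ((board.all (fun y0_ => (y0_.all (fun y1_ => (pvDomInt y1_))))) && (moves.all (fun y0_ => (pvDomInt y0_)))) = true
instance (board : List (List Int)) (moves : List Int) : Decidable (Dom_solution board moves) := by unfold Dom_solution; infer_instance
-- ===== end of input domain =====

-- B replaces A's upfront per-column stack precomputation by a direct simulation on a
-- copied grid (scan each moved column top-down for the first doll); same return value.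


-- ===== PORT A =====
-- one pass of A's inner 'for i in range(width)' loop for row index idx
def prBody (board : List (List Int)) (idx : Nat) (sa : List (List Int)) (i : Nat) : List (List Int) :=
  let val := PySem.List.pyGetD (PySem.List.pyGetD board (idx : Int) []) (i : Int) 0
  if val ≠ 0 then
    PySem.List.pySetD sa (i : Int) (PySem.List.pyGetD sa (i : Int) [] ++ [val])
  else sa

def pushRowA (board : List (List Int)) (width : Nat) (idx : Nat) (sa : List (List Int)) : List (List Int) :=
  (List.range width).foldl (prBody board idx) sa

-- A's 'while idx >= 0' countdown loop; fuel k means idx = k-1 is processed next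
def buildA (board : List (List Int)) (width : Nat) : Nat → List (List Int) → List (List Int)
  | 0, sa => sa
  | k + 1, sa => buildA board width k (pushRowA board width k sa)

-- A's per-move body ('continue' branches return the state unchanged);
-- pyGetD/pySetD with defaults are exact where Python does not raise (Pre_ below).
def stepA (st : Int × List Int × List (List Int)) (move : Int) : Int × List Int × List (List Int) :=
  let answer := st.1
  let basket := st.2.1
  let sa := st.2.2
  let stack := PySem.List.pyGetD sa (move - 1) []
  if stack.length = 0 then st
  else
    let val := stack.getLastD 0
    let sa' := PySem.List.pySetD sa (move - 1) stack.dropLast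
    if basket.length = 0 then (answer, basket ++ [val], sa')
    else if val = basket.getLastD 0 then (answer + 2, basket.dropLast, sa')
    else (answer, basket ++ [val], sa')

def solution (board : List (List Int)) (moves : List Int) : Int :=
  let width := board.length
  let stackArr := buildA board width width ((List.range width).map (fun _ => ([] : List Int)))
  (moves.foldl stepA (0, [], stackArr)).1

-- ===== PORT B =====
-- B's inner 'for r in range(len(board))' scan: first nonzero cell of column c, zeroed
def pickColB : List (List Int) → Int → List (List Int) × Option Int
  | [], _ => ([], none)
  | row :: rest, c =>
    let v := PySem.List.pyGetD row c 0
    if v ≠ 0 then (PySem.List.pySetD row c 0 :: rest, some v)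
    else
      let res := pickColB rest c
      (row :: res.1, res.2)

def stepB (st : Int × List Int × List (List Int)) (move : Int) : Int × List Int × List (List Int) :=
  let res := pickColB st.2.2 (move - 1)
  match res.2 with
  | none => (st.1, st.2.1, res.1)
  | some v =>
    if st.2.1.length ≠ 0 ∧ st.2.1.getLastD 0 = v then (st.1 + 2, st.2.1.dropLast, res.1)
    else (st.1, st.2.1 ++ [v], res.1)

def solution_alt (board : List (List Int)) (moves : List Int) : Int :=
  (moves.foldl stepB (0, [], board)).1

-- ===== PRECONDITION & SPEC =====
-- Pre_ excludes inputs where A raises IndexError (a row shorter than len(board), or a move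
-- outside Python's index range for the width-long stack array), and additionally ragged
-- boards (a row longer than len(board)) combined with a non-positive move, where Python's
-- negative-index wraparound resolves to different columns in A's width-long stack array and
-- in the longer rows, so either column choice on such a malformed board is accidental.
def Pre_solution (board : List (List Int)) (moves : List Int) : Prop :=
  (∀ row ∈ board, board.length ≤ row.length) ∧
  (∀ m ∈ moves, 1 - (board.length : Int) ≤ m ∧ m ≤ (board.length : Int)) ∧
  ((∀ m ∈ moves, 1 ≤ m) ∨ (∀ row ∈ board, row.length = board.length))
instance (board : List (List Int)) (moves : List Int) : Decidable (Pre_solution board moves) := by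
  unfold Pre_solution; infer_instance

def pvWitness_solution : List (List Int) × List Int := ([[0, 3], [2, 5]], [1, 2, 2])

def Spec_solution (board : List (List Int)) (moves : List Int) (out : Int) : Prop := out = solution_alt board moves
instance (board : List (List Int)) (moves : List Int) (out : Int) : Decidable (Spec_solution board moves out) := by unfold Spec_solution; infer_instance

-- ===== CLAIM (what is proved, stated in full; the proofs are below) =====
def Claim_equal_solution : Prop := ∀ (board : List (List Int)) (moves : List Int), Dom_solution board moves → Pre_solution board moves → Spec_solution board moves (solution board moves)

-- ===== LEMMAS AND PROOFS =====

-- Python index resolution for a total pyGetD/pySetD inside range (negative = from the end)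
theorem pyGetD_resolve {α : Type} [Inhabited α] (xs : List α) (i : Int) (d : α)
    (h1 : -(xs.length : Int) ≤ i) (h2 : i < xs.length) :
    PySem.List.pyGetD xs i d = xs.getD (if i < 0 then ((xs.length : Int) + i).toNat else i.toNat) d := by
  by_cases h0 : 0 ≤ i
  · simp only [PySem.List.pyGetD, PySem.List.pyGet?, PySem.List.pyIdx?, if_pos h0, if_pos h2,
      if_neg (by omega : ¬ i < 0)]
    simp [List.getD_eq_getElem?_getD]
  · have hnn : xs.length - (-i).toNat = ((xs.length : Int) + i).toNat := by omega
    simp only [PySem.List.pyGetD, PySem.List.pyGet?, PySem.List.pyIdx?, if_neg h0, if_pos h1,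
      if_pos (by omega : i < 0), hnn]
    simp [List.getD_eq_getElem?_getD]

theorem pySetD_resolve {α : Type} (xs : List α) (i : Int) (v : α)
    (h1 : -(xs.length : Int) ≤ i) (h2 : i < xs.length) :
    PySem.List.pySetD xs i v = xs.set (if i < 0 then ((xs.length : Int) + i).toNat else i.toNat) v := by
  by_cases h0 : 0 ≤ i
  · simp only [PySem.List.pySetD, PySem.List.pySet?, PySem.List.pyIdx?, if_pos h0, if_pos h2,
      if_neg (by omega : ¬ i < 0), Option.map_some, Option.getD_some]
  · have hnn : xs.length - (-i).toNat = ((xs.length : Int) + i).toNat := by omega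
    simp only [PySem.List.pySetD, PySem.List.pySet?, PySem.List.pyIdx?, if_neg h0, if_pos h1,
      if_pos (by omega : i < 0), hnn, Option.map_some, Option.getD_some]

-- the (top-down) column j of a grid, and the corresponding A-stack contents
def colv (g : List (List Int)) (j : Nat) : List Int := g.map (fun row => row.getD j 0)
def stk (g : List (List Int)) (j : Nat) : List Int :=
  ((colv g j).filter (fun v => v ≠ 0)).reverse

-- the state relation: answers/baskets equal, stacks = reversed nonzero columns of the grid
def SimInv (board sa g : List (List Int)) : Prop :=
  sa.length = board.length ∧ g.map List.length = board.map List.length ∧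
  ∀ j < board.length, sa.getD j [] = stk g j

theorem prBody_eq (board : List (List Int)) (idx : Nat) (sa : List (List Int)) (i : Nat) :
    prBody board idx sa i =
      if (board.getD idx []).getD i 0 ≠ 0 then
        sa.set i (sa.getD i [] ++ [(board.getD idx []).getD i 0])
      else sa := by
  simp [prBody, PySem.List.pyGetD_natCast, PySem.List.pySetD_natCast, List.getD_eq_getElem?_getD]

theorem prFold_length (board : List (List Int)) (idx : Nat) (l : List Nat) (sa : List (List Int)) :
    (l.foldl (prBody board idx) sa).length = sa.length := by
  induction l generalizing sa with
  | nil => rfl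
  | cons i t ih =>
    simp only [List.foldl_cons, ih, prBody_eq]
    split_ifs <;> simp

theorem prFold_skip (board : List (List Int)) (idx : Nat) (l : List Nat) (sa : List (List Int))
    (j : Nat) (hj : j ∉ l) : (l.foldl (prBody board idx) sa).getD j [] = sa.getD j [] := by
  induction l generalizing sa with
  | nil => rfl
  | cons i t ih =>
    simp only [List.mem_cons, not_or] at hj
    simp only [List.foldl_cons, ih _ hj.2, prBody_eq]
    split_ifs with h
    · simp [List.getD_eq_getElem?_getD, List.getElem?_set_ne (fun he => hj.1 he.symm)]
    · rfl

theorem prFold_mem (board : List (List Int)) (idx : Nat) (l : List Nat) (hnd : l.Nodup)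
    (sa : List (List Int)) (j : Nat) (hmem : j ∈ l) (hlt : j < sa.length) :
    (l.foldl (prBody board idx) sa).getD j [] =
      sa.getD j [] ++ (if (board.getD idx []).getD j 0 ≠ 0 then [(board.getD idx []).getD j 0] else []) := by
  induction l generalizing sa with
  | nil => simp at hmem
  | cons i t ih =>
    rcases List.mem_cons.mp hmem with rfl | hmem'
    · have hnt : j ∉ t := (List.nodup_cons.mp hnd).1
      rw [List.foldl_cons, prFold_skip board idx t _ j hnt, prBody_eq]
      split_ifs with h
      · simp [List.getD_eq_getElem?_getD, hlt]
      · simp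
    · have hnd' := (List.nodup_cons.mp hnd).2
      have hij : i ≠ j := fun he => (List.nodup_cons.mp hnd).1 (he ▸ hmem')
      rw [List.foldl_cons, ih hnd' _ hmem' (by rw [prBody_eq]; split_ifs <;> simp [hlt]), prBody_eq]
      split_ifs <;> simp [List.getD_eq_getElem?_getD, List.getElem?_set_ne hij]

theorem pushRowA_getD (board : List (List Int)) (width : Nat) (idx : Nat) (sa : List (List Int))
    (hlen : sa.length = width) (j : Nat) (hj : j < width) :
    (pushRowA board width idx sa).getD j [] =
      sa.getD j [] ++ (if (board.getD idx []).getD j 0 ≠ 0 then [(board.getD idx []).getD j 0] else []) := by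
  exact prFold_mem board idx (List.range width) (List.nodup_range)
    sa j (List.mem_range.mpr hj) (hlen ▸ hj)

theorem take_succ_filter_rev (l : List Int) (k : Nat) :
    ((l.take (k+1)).filter (fun v => v ≠ 0)).reverse =
      (if l.getD k 0 ≠ 0 then [l.getD k 0] else []) ++ ((l.take k).filter (fun v => v ≠ 0)).reverse := by
  rw [List.take_add_one, List.filter_append, List.reverse_append, List.getD_eq_getElem?_getD]
  by_cases hk : k < l.length
  · rw [List.getElem?_eq_getElem hk]
    by_cases hz : l[k] = 0 <;> simp [hz]
  · rw [List.getElem?_eq_none (by omega)]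
    simp

theorem colv_take (board : List (List Int)) (j k : Nat) :
    colv (board.take k) j = (colv board j).take k := by
  simp [colv, List.map_take]

theorem colv_getD (board : List (List Int)) (j k : Nat) :
    (colv board j).getD k 0 = (board.getD k []).getD j 0 := by
  by_cases hk : k < board.length
  · simp [colv, List.getD_eq_getElem?_getD, List.getElem?_eq_getElem hk, List.getElem?_map]
  · simp [colv, List.getD_eq_getElem?_getD,
      List.getElem?_eq_none (by simpa using Nat.le_of_not_lt hk)]

theorem stk_take_succ (board : List (List Int)) (j k : Nat) :
    stk (board.take (k+1)) j =
      (if (board.getD k []).getD j 0 ≠ 0 then [(board.getD k []).getD j 0] else []) ++ stk (board.take k) j := by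
  rw [stk, stk, colv_take, colv_take, take_succ_filter_rev, colv_getD]

theorem buildA_getD (board : List (List Int)) (width : Nat) (k : Nat) (sa : List (List Int))
    (hlen : sa.length = width) (j : Nat) (hj : j < width) :
    (buildA board width k sa).getD j [] = sa.getD j [] ++ stk (board.take k) j := by
  induction k generalizing sa with
  | zero => simp [buildA, stk, colv]
  | succ k ih =>
    have hlen' : (pushRowA board width k sa).length = width := by
      rw [pushRowA, prFold_length, hlen]
    rw [buildA, ih _ hlen', pushRowA_getD board width k sa hlen j hj, stk_take_succ,
      List.append_assoc]

theorem buildA_length (board : List (List Int)) (width k : Nat) (sa : List (List Int)) :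
    (buildA board width k sa).length = sa.length := by
  induction k generalizing sa with
  | zero => rfl
  | succ k ih => rw [buildA, ih, pushRowA, prFold_length]

theorem pickColB_none (g : List (List Int)) (c : Int) (j : Nat)
    (H : ∀ row ∈ g, PySem.List.pyGetD row c 0 = row.getD j 0)
    (hz : ∀ row ∈ g, row.getD j 0 = 0) :
    pickColB g c = (g, none) := by
  induction g with
  | nil => rfl
  | cons row rest ih =>
    have h1 := H row (by simp)
    have h2 := hz row (by simp)
    simp only [pickColB, h1, h2, ne_eq, not_true_eq_false, if_false,
      ih (fun r hr => H r (by simp [hr])) (fun r hr => hz r (by simp [hr]))]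

theorem pickColB_some (g : List (List Int)) (c : Int) (j : Nat)
    (H : ∀ row ∈ g, PySem.List.pyGetD row c 0 = row.getD j 0 ∧ PySem.List.pySetD row c 0 = row.set j 0)
    (hnz : ¬ ∀ row ∈ g, row.getD j 0 = 0) :
    ∃ g₁ row g₂, g = g₁ ++ row :: g₂ ∧ (∀ r ∈ g₁, r.getD j 0 = 0) ∧ row.getD j 0 ≠ 0 ∧
      pickColB g c = (g₁ ++ row.set j 0 :: g₂, some (row.getD j 0)) := by
  induction g with
  | nil => exact absurd (by simp) hnz
  | cons row rest ih =>
    have h1 := (H row (by simp)).1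
    have h2 := (H row (by simp)).2
    by_cases hv : row.getD j 0 = 0
    · have hnz' : ¬ ∀ r ∈ rest, r.getD j 0 = 0 := by
        intro hall
        exact hnz (by intro r hr; rcases List.mem_cons.mp hr with rfl | hr' <;>
          [exact hv; exact hall r hr'])
      obtain ⟨g₁, row', g₂, hdec, hzs, hnzr, heq⟩ := ih (fun r hr => H r (by simp [hr])) hnz'
      refine ⟨row :: g₁, row', g₂, by rw [hdec]; rfl, ?_, hnzr, ?_⟩
      · intro r hr
        rcases List.mem_cons.mp hr with rfl | hr'
        · exact hv
        · exact hzs r hr'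
      · simp only [pickColB, h1, hv, ne_eq, not_true_eq_false, if_false, heq, List.cons_append]
    · refine ⟨[], row, rest, rfl, by simp, hv, ?_⟩
      simp only [pickColB, h1, h2, ne_eq, hv, not_false_eq_true, if_true, List.nil_append]

theorem loop_eq (board : List (List Int)) (moves : List Int)
    (hrows : ∀ row ∈ board, board.length ≤ row.length)
    (hrange : ∀ m ∈ moves, 1 - (board.length : Int) ≤ m ∧ m ≤ (board.length : Int))
    (hdisj : (∀ m ∈ moves, 1 ≤ m) ∨ (∀ row ∈ board, row.length = board.length))
    (ans : Int) (basket : List Int) (sa g : List (List Int)) (hinv : SimInv board sa g) :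
    (moves.foldl stepA (ans, basket, sa)).1 = (moves.foldl stepB (ans, basket, g)).1 := by
  revert hrange hdisj hinv
  induction moves generalizing ans basket sa g with
  | nil => intro _ _ _; rfl
  | cons m t ih =>
    intro hrange hdisj hinv
    obtain ⟨hsalen, hglen, hstk⟩ := hinv
    have hrange' : ∀ x ∈ t, 1 - (board.length : Int) ≤ x ∧ x ≤ (board.length : Int) :=
      fun x hx => hrange x (List.mem_cons_of_mem m hx)
    have hdisj' : (∀ x ∈ t, 1 ≤ x) ∨ (∀ row ∈ board, row.length = board.length) :=
      hdisj.imp (fun h x hx => h x (List.mem_cons_of_mem m hx)) id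
    have hm := hrange m (by simp)
    have hwpos : 0 < board.length := by omega
    have hrowlen : ∀ row ∈ g, board.length ≤ row.length := by
      intro row hr
      have hmm : row.length ∈ board.map List.length := by
        rw [← hglen]; exact List.mem_map_of_mem hr
      obtain ⟨r₀, hr₀, he⟩ := List.mem_map.mp hmm
      rw [← he]; exact hrows r₀ hr₀
    have hsq : m - 1 < 0 → ∀ row ∈ g, row.length = board.length := by
      intro hneg row hr
      rcases hdisj with hpos | hsq'
      · exact absurd (hpos m (by simp)) (by omega)
      · have hmm : row.length ∈ board.map List.length := by
          rw [← hglen]; exact List.mem_map_of_mem hr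
        obtain ⟨r₀, hr₀, he⟩ := List.mem_map.mp hmm
        rw [← he]; exact hsq' r₀ hr₀
    obtain ⟨j, hjdef⟩ : ∃ j : Nat,
        j = if m - 1 < 0 then ((board.length : Int) + (m - 1)).toNat else (m - 1).toNat :=
      ⟨_, rfl⟩
    have hj : j < board.length := by rw [hjdef]; split_ifs <;> omega
    have hrowfact : ∀ row ∈ g, PySem.List.pyGetD row (m - 1) 0 = row.getD j 0 ∧
        PySem.List.pySetD row (m - 1) 0 = row.set j 0 := by
      intro row hr
      have hge := hrowlen row hr
      have hlen' : m - 1 < 0 → row.length = board.length := fun hneg => hsq hneg row hr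
      have h1 : -(row.length : Int) ≤ m - 1 := by
        by_cases hneg : m - 1 < 0
        · have := hlen' hneg; omega
        · omega
      have h2 : m - 1 < (row.length : Int) := by omega
      have hidx : (if m - 1 < 0 then ((row.length : Int) + (m - 1)).toNat else (m - 1).toNat) = j := by
        by_cases hneg : m - 1 < 0
        · have := hlen' hneg
          rw [hjdef, if_pos hneg, if_pos hneg]; omega
        · rw [hjdef, if_neg hneg, if_neg hneg]
      exact ⟨by rw [pyGetD_resolve row (m - 1) 0 h1 h2, hidx],
             by rw [pySetD_resolve row (m - 1) 0 h1 h2, hidx]⟩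
    have hsa1 : -(sa.length : Int) ≤ m - 1 := by omega
    have hsa2 : m - 1 < (sa.length : Int) := by omega
    have hidxsa : (if m - 1 < 0 then ((sa.length : Int) + (m - 1)).toNat else (m - 1).toNat) = j := by
      by_cases hneg : m - 1 < 0
      · rw [hjdef, if_pos hneg, if_pos hneg]; omega
      · rw [hjdef, if_neg hneg, if_neg hneg]
    have hget_sa : PySem.List.pyGetD sa (m - 1) [] = sa.getD j [] := by
      rw [pyGetD_resolve sa (m - 1) [] hsa1 hsa2, hidxsa]
    have hset_sa : ∀ x, PySem.List.pySetD sa (m - 1) x = sa.set j x := fun x => by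
      rw [pySetD_resolve sa (m - 1) x hsa1 hsa2, hidxsa]
    rcases hF : (colv g j).filter (fun v => v ≠ 0) with _ | ⟨v, F'⟩
    · -- empty column: both sides skip the move
      have hz : ∀ row ∈ g, row.getD j 0 = 0 := by
        intro row hr
        have hmem : row.getD j 0 ∈ colv g j := List.mem_map_of_mem hr
        have := List.filter_eq_nil_iff.mp hF _ hmem
        simpa using this
      have hpick : pickColB g (m - 1) = (g, none) :=
        pickColB_none g (m - 1) j (fun r hr => (hrowfact r hr).1) hz
      have hstack : sa.getD j [] = [] := by rw [hstk j hj, stk, hF]; rfl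
      have hA : stepA (ans, basket, sa) m = (ans, basket, sa) := by
        simp only [stepA, hget_sa, hstack]
        rfl
      have hB : stepB (ans, basket, g) m = (ans, basket, g) := by
        simp only [stepB, hpick]
      rw [List.foldl_cons, List.foldl_cons, hA, hB]
      exact ih ans basket sa g hrange' hdisj' ⟨hsalen, hglen, hstk⟩
    · -- nonempty column
      have hstack : sa.getD j [] = (v :: F').reverse := by rw [hstk j hj, stk, hF]
      have hnz : ¬ ∀ row ∈ g, row.getD j 0 = 0 := by
        intro hall
        have hnil : (colv g j).filter (fun v => v ≠ 0) = [] := by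
          apply List.filter_eq_nil_iff.mpr
          intro x hx
          obtain ⟨r, hr, rfl⟩ := List.mem_map.mp hx
          simpa [List.getD_eq_getElem?_getD] using hall r hr
        rw [hF] at hnil; exact List.cons_ne_nil _ _ hnil
      obtain ⟨g₁, row, g₂, hdec, hzs, hvr, hpick⟩ :=
        pickColB_some g (m - 1) j (fun r hr => hrowfact r hr) hnz
      have hcol : colv g j = colv g₁ j ++ row.getD j 0 :: colv g₂ j := by
        rw [hdec]; simp [colv]
      have hFeq : (colv g j).filter (fun v => v ≠ 0) =
          row.getD j 0 :: (colv g₂ j).filter (fun v => v ≠ 0) := by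
        rw [hcol, List.filter_append]
        have hnil : (colv g₁ j).filter (fun v => v ≠ 0) = [] := by
          apply List.filter_eq_nil_iff.mpr
          intro x hx
          obtain ⟨r, hr, rfl⟩ := List.mem_map.mp hx
          simpa [List.getD_eq_getElem?_getD] using hzs r hr
        rw [hnil, List.nil_append,
          List.filter_cons_of_pos (by simpa [List.getD_eq_getElem?_getD] using hvr)]
      rw [hF] at hFeq
      injection hFeq with hv hF'
      rw [← hv] at hpick
      have hrowmem : row ∈ g := by rw [hdec]; simp
      have hjrow : j < row.length := lt_of_lt_of_le hj (hrowlen row hrowmem)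
      have hA : stepA (ans, basket, sa) m =
          (if basket.length ≠ 0 ∧ basket.getLastD 0 = v then
            (ans + 2, basket.dropLast, sa.set j F'.reverse)
          else (ans, basket ++ [v], sa.set j F'.reverse)) := by
        have hval : ((v :: F').reverse).getLastD 0 = v := by
          rw [List.reverse_cons, List.getLastD_concat]
        have hdl : ((v :: F').reverse).dropLast = F'.reverse := by
          rw [List.reverse_cons, List.dropLast_concat]
        simp only [stepA, hget_sa, hstack, hset_sa, hval, hdl]
        rw [if_neg (by simp)]
        by_cases hb : basket.length = 0
        · rw [if_pos hb, if_neg (by simp [hb])]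
        · rw [if_neg hb]
          by_cases ht : v = basket.getLastD 0
          · rw [if_pos ht, if_pos ⟨hb, ht.symm⟩]
          · rw [if_neg ht, if_neg (by rintro ⟨_, h⟩; exact ht h.symm)]
      have hB : stepB (ans, basket, g) m =
          (if basket.length ≠ 0 ∧ basket.getLastD 0 = v then
            (ans + 2, basket.dropLast, g₁ ++ row.set j 0 :: g₂)
          else (ans, basket ++ [v], g₁ ++ row.set j 0 :: g₂)) := by
        simp only [stepB, hpick]
      have hinv' : SimInv board (sa.set j F'.reverse) (g₁ ++ row.set j 0 :: g₂) := by
        refine ⟨by simp [hsalen], ?_, ?_⟩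
        · have hgl := hglen
          rw [hdec] at hgl
          simpa [List.map_append] using hgl
        · intro j'' hj''
          by_cases hjj : j'' = j
          · subst hjj
            have : (sa.set j'' F'.reverse).getD j'' [] = F'.reverse := by
              simp [List.getD_eq_getElem?_getD, hsalen ▸ hj'']
            rw [this, stk]
            have hcol' : colv (g₁ ++ row.set j'' 0 :: g₂) j'' =
                colv g₁ j'' ++ (0 : Int) :: colv g₂ j'' := by
              simp [colv, hjrow]
            rw [hcol', List.filter_append]
            have hnil : (colv g₁ j'').filter (fun v => v ≠ 0) = [] := by
              apply List.filter_eq_nil_iff.mpr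
              intro x hx
              obtain ⟨r, hr, rfl⟩ := List.mem_map.mp hx
              simpa [List.getD_eq_getElem?_getD] using hzs r hr
            rw [hnil, hF']
            simp
          · have h1 : (sa.set j F'.reverse).getD j'' [] = sa.getD j'' [] := by
              simp [List.getD_eq_getElem?_getD, List.getElem?_set_ne (fun he => hjj he.symm)]
            rw [h1, hstk j'' hj'', stk, stk]
            have hcol' : colv (g₁ ++ row.set j 0 :: g₂) j'' = colv g j'' := by
              rw [hdec]; simp [colv, List.getElem?_set_ne (fun he => hjj he.symm)]
            rw [hcol']
      rw [List.foldl_cons, List.foldl_cons, hA, hB]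
      by_cases hc : basket.length ≠ 0 ∧ basket.getLastD 0 = v
      · rw [if_pos hc, if_pos hc]
        exact ih _ _ _ _ hrange' hdisj' hinv'
      · rw [if_neg hc, if_neg hc]
        exact ih _ _ _ _ hrange' hdisj' hinv'

-- ===== VERDICT (by name: the statement is the Claim_ definition above) =====
theorem solution_spec : Claim_equal_solution := by
  intro board moves _ hpre
  obtain ⟨hrows, hrange, hdisj⟩ := hpre
  unfold Spec_solution solution solution_alt
  apply loop_eq board moves hrows hrange hdisj
  refine ⟨?_, rfl, ?_⟩
  · rw [buildA_length]; simp
  · intro j hj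
    rw [buildA_getD board board.length board.length _ (by simp) j hj, List.take_length]
    simp [List.getD_eq_getElem?_getD, List.length_range, hj]
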